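-- pv_equiv track=rewrite | github.com/Timsbim/AoC | 2023/day_18.py | looping
-- ===== SOURCE A (Python) =====
-- def looping(instructions):
--     loop = [(0, 0)]
--     for direction, count in instructions:
--         y, x = loop[-1]
--         if direction == "R":
--             steps = ((y, x + i) for i in range(1, count + 1))
--         elif direction == "D":
--             steps = ((y + i, x) for i in range(1, count + 1))
--         elif direction == "L":
--             steps = ((y, x - i) for i in range(1, count + 1))
--         else:  # direction == "U"
--             steps = ((y - i, x) for i in range(1, count + 1))
--         loop.extend(steps)
--
--     return loop[:-1]
-- ===== SOURCE B (Python) =====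
-- def looping(instructions):
--     # Phase 1: flatten the instructions into one list of unit-step deltas.
--     DELTA = {"R": (0, 1), "D": (1, 0), "L": (0, -1)}
--     deltas = [DELTA.get(d, (-1, 0)) for d, c in instructions for _ in range(c)]
--     if not deltas:
--         return []
--     # Phase 2: prefix-sum scan over all deltas but the last one.
--     pts = [(0, 0)]
--     y = x = 0
--     for dy, dx in deltas[:-1]:
--         y += dy
--         x += dx
--         pts.append((y, x))
--     return pts
-- ===== Notes on version B (the rewrite author's own statement) =====
-- stated objective: alternative
-- what changed: Instead of carrying the growing path and extending it per instruction while re-reading its last point, B first flattens the instructions into one list of unit-step deltas and then produces the points by a single prefix-sum scan over all deltas but the last.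
import Mathlib
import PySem

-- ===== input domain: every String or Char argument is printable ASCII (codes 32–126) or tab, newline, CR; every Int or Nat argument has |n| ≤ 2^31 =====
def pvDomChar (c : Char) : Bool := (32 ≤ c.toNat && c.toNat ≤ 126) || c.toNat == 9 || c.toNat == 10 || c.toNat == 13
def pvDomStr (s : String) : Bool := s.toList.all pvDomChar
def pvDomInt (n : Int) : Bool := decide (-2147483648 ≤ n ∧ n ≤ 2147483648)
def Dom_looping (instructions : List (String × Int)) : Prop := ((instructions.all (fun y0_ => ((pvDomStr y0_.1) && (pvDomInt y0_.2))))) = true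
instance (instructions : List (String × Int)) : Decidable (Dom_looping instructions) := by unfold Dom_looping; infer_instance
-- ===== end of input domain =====

-- B replaces A's "extend the path per instruction, re-reading its last point" with a two-phase
-- "flatten all instructions to unit deltas, then prefix-sum scan" (objective: alternative).

-- ===== PORT A =====
-- one iteration of A's for-loop; the pyGetD default is never used: loop starts at [(0,0)] and only grows
def stepA (loop : List (Int × Int)) (inst : String × Int) : List (Int × Int) :=
  let p := PySem.List.pyGetD loop (-1) ((0 : Int), (0 : Int))
  let y := p.1
  let x := p.2
  let steps :=
    if inst.1 == "R" then (PySem.List.pyRange 1 (inst.2 + 1) 1).map (fun i => (y, x + i))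
    else if inst.1 == "D" then (PySem.List.pyRange 1 (inst.2 + 1) 1).map (fun i => (y + i, x))
    else if inst.1 == "L" then (PySem.List.pyRange 1 (inst.2 + 1) 1).map (fun i => (y, x - i))
    else (PySem.List.pyRange 1 (inst.2 + 1) 1).map (fun i => (y - i, x))
  loop ++ steps

def looping (instructions : List (String × Int)) : List (Int × Int) :=
  let loop := instructions.foldl stepA [((0 : Int), (0 : Int))]
  PySem.List.slice loop none (some (-1))    -- loop[:-1]

-- ===== PORT B =====
-- DELTA.get(d, (-1, 0))
def unitDelta (d : String) : Int × Int :=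
  (PySem.Dict.ofList [("R", ((0 : Int), (1 : Int))), ("D", (1, 0)), ("L", (0, -1))]).getD d (-1, 0)

-- one iteration of B's scan loop
def stepB (st : List (Int × Int) × Int × Int) (d : Int × Int) : List (Int × Int) × Int × Int :=
  (st.1 ++ [(st.2.1 + d.1, st.2.2 + d.2)], st.2.1 + d.1, st.2.2 + d.2)

def looping_alt (instructions : List (String × Int)) : List (Int × Int) :=
  let deltas := instructions.flatMap (fun dc => List.replicate dc.2.toNat (unitDelta dc.1))
  if deltas = [] then []
  else
    ((PySem.List.slice deltas none (some (-1))).foldl stepB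
      ([((0 : Int), (0 : Int))], (0 : Int), (0 : Int))).1

-- ===== PRECONDITION & SPEC =====
def Spec_looping (instructions : List (String × Int)) (out : List (Int × Int)) : Prop := out = looping_alt instructions
instance (instructions : List (String × Int)) (out : List (Int × Int)) : Decidable (Spec_looping instructions out) := by unfold Spec_looping; infer_instance

-- ===== CLAIM (what is proved, stated in full; the proofs are below) =====
def Claim_equal_looping : Prop := ∀ (instructions : List (String × Int)), Dom_looping instructions → Spec_looping instructions (looping instructions)

-- ===== LEMMAS AND PROOFS =====

-- the path walked from p by the delta list ds (excluding the start point)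
def walk : Int × Int → List (Int × Int) → List (Int × Int)
  | _, [] => []
  | p, d :: ds => (p.1 + d.1, p.2 + d.2) :: walk (p.1 + d.1, p.2 + d.2) ds

-- the endpoint of that path
def endp (p : Int × Int) (ds : List (Int × Int)) : Int × Int :=
  (p.1 + (ds.map Prod.fst).sum, p.2 + (ds.map Prod.snd).sum)

theorem length_walk (p : Int × Int) (ds : List (Int × Int)) : (walk p ds).length = ds.length := by
  induction ds generalizing p with
  | nil => rfl
  | cons d ds ih => simp [walk, ih]

theorem endp_nil (p : Int × Int) : endp p [] = p := by simp [endp]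

theorem endp_cons (p d : Int × Int) (ds : List (Int × Int)) :
    endp p (d :: ds) = endp (p.1 + d.1, p.2 + d.2) ds := by
  simp only [endp, List.map_cons, List.sum_cons, Prod.mk.injEq]
  constructor <;> ring

theorem getLast?_cons_ne_nil {α : Type} (a : α) (l : List α) (h : l ≠ []) :
    (a :: l).getLast? = l.getLast? := by
  cases l with
  | nil => exact absurd rfl h
  | cons b t => exact List.getLast?_cons_cons

theorem walk_append (a b : List (Int × Int)) (p : Int × Int) :
    walk p (a ++ b) = walk p a ++ walk (endp p a) b := by
  induction a generalizing p with
  | nil => simp [walk, endp_nil]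
  | cons d ds ih => simp [walk, ih, endp_cons]

theorem walk_getLast? (p : Int × Int) (ds : List (Int × Int)) (h : ds ≠ []) :
    (walk p ds).getLast? = some (endp p ds) := by
  induction ds generalizing p with
  | nil => exact absurd rfl h
  | cons d ds ih =>
    cases ds with
    | nil => simp [walk, endp_cons, endp_nil]
    | cons e es =>
      rw [walk, getLast?_cons_ne_nil _ _ (by simp [walk]), ih _ (by simp)]
      simp [endp_cons]

theorem walk_dropLast (p : Int × Int) (ds : List (Int × Int)) :
    walk p ds.dropLast = (walk p ds).dropLast := by
  induction ds generalizing p with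
  | nil => rfl
  | cons d ds ih =>
    cases ds with
    | nil => rfl
    | cons e es =>
      rw [List.dropLast_cons_of_ne_nil (by simp), walk, walk, ih,
        List.dropLast_cons_of_ne_nil (by simp [walk])]

theorem walk_replicate (n : Nat) (y x dy dx : Int) :
    walk (y, x) (List.replicate n (dy, dx)) =
      (List.range n).map (fun (k : Nat) => (y + (1 + (k : Int)) * dy, x + (1 + (k : Int)) * dx)) := by
  induction n generalizing y x with
  | zero => rfl
  | succ m ih =>
    have hrep : List.replicate (m + 1) ((dy : Int), (dx : Int))
        = List.replicate m (dy, dx) ++ [(dy, dx)] := List.replicate_succ' ..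
    have hend : endp (y, x) (List.replicate m ((dy : Int), (dx : Int)))
        = (y + (m : Int) * dy, x + (m : Int) * dx) := by
      simp [endp, List.map_replicate, List.sum_replicate]
    rw [hrep, walk_append, ih, hend, List.range_succ, List.map_append]
    congr 1
    simp only [walk, List.map_cons, List.map_nil, Prod.mk.injEq, List.cons.injEq, and_true]
    constructor <;> ring

theorem unitDelta_eq (d : String) :
    unitDelta d = if d == "R" then ((0 : Int), (1 : Int))
      else if d == "D" then (1, 0) else if d == "L" then (0, -1) else (-1, 0) := by
  by_cases h1 : d = "R"
  · subst h1; rfl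
  · by_cases h2 : d = "D"
    · subst h2; rfl
    · by_cases h3 : d = "L"
      · subst h3; rfl
      · have hitems : (PySem.Dict.ofList
            [("R", ((0 : Int), (1 : Int))), ("D", (1, 0)), ("L", (0, -1))]).items
            = [("R", ((0 : Int), (1 : Int))), ("D", (1, 0)), ("L", (0, -1))] := by rfl
        simp only [unitDelta, PySem.Dict.getD, PySem.Dict.get?, hitems]
        rw [List.find?_cons_of_neg (by simp only [beq_iff_eq]; exact fun he => h1 he.symm),
          List.find?_cons_of_neg (by simp only [beq_iff_eq]; exact fun he => h2 he.symm),
          List.find?_cons_of_neg (by simp only [beq_iff_eq]; exact fun he => h3 he.symm)]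
        simp [h1, h2, h3]

-- one instruction of A produces exactly the walk of its unit deltas
theorem stepA_eq (loop : List (Int × Int)) (p : Int × Int) (h : loop.getLast? = some p)
    (inst : String × Int) :
    stepA loop inst = loop ++ walk p (List.replicate inst.2.toNat (unitDelta inst.1)) := by
  have hne : loop ≠ [] := by intro hn; simp [hn] at h
  have hp : PySem.List.pyGetD loop (-1) ((0 : Int), (0 : Int)) = p := by
    rw [PySem.List.pyGetD_neg_one loop _ hne]
    have hg := List.getLast?_eq_some_getLast hne
    rw [hg] at h
    exact Option.some.inj h
  obtain ⟨dir, c⟩ := inst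
  have hr : PySem.List.pyRange 1 (c + 1) 1
      = (List.range c.toNat).map (fun (k : Nat) => 1 + (k : Int)) := by
    have hc : ((c + 1 : Int) - 1).toNat = c.toNat := by omega
    rw [PySem.List.pyRange_one, hc]
  obtain ⟨y, x⟩ := p
  simp only [stepA, hp, hr, unitDelta_eq, List.map_map]
  congr 1
  by_cases h1 : dir = "R"
  · subst h1
    simp only [beq_self_eq_true, if_true]
    rw [walk_replicate]
    apply List.map_congr_left
    intro k _
    simp only [Function.comp, Prod.mk.injEq]
    constructor <;> ring
  · by_cases h2 : dir = "D"
    · subst h2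
      simp only [beq_iff_eq, h1, if_false, beq_self_eq_true, if_true]
      rw [walk_replicate]
      apply List.map_congr_left
      intro k _
      simp only [Function.comp, Prod.mk.injEq]
      constructor <;> ring
    · by_cases h3 : dir = "L"
      · subst h3
        simp only [beq_iff_eq, h1, h2, if_false, beq_self_eq_true, if_true]
        rw [walk_replicate]
        apply List.map_congr_left
        intro k _
        simp only [Function.comp, Prod.mk.injEq]
        constructor <;> ring
      · simp only [beq_iff_eq, h1, h2, h3, if_false]
        rw [walk_replicate]
        apply List.map_congr_left
        intro k _
        simp only [Function.comp, Prod.mk.injEq]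
        constructor <;> ring

-- A's whole fold, from any nonempty accumulator
theorem foldA_eq (insts : List (String × Int)) (acc : List (Int × Int)) (p : Int × Int)
    (h : acc.getLast? = some p) :
    insts.foldl stepA acc =
      acc ++ walk p (insts.flatMap (fun dc => List.replicate dc.2.toNat (unitDelta dc.1))) := by
  induction insts generalizing acc p with
  | nil => simp [walk]
  | cons inst rest ih =>
    have hstep := stepA_eq acc p h inst
    set r := List.replicate inst.2.toNat (unitDelta inst.1) with hr
    have hlast : (acc ++ walk p r).getLast? = some (endp p r) := by
      cases hrn : r with
      | nil => simpa [walk, endp_nil] using h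
      | cons e es =>
        rw [List.getLast?_append_of_ne_nil _ (by simp [walk])]
        exact walk_getLast? p (e :: es) (by simp)
    rw [List.foldl_cons, hstep, ih _ _ hlast, List.flatMap_cons, walk_append, List.append_assoc]

-- B's scan loop
theorem foldB_eq (ds : List (Int × Int)) (acc : List (Int × Int)) (y x : Int) :
    ds.foldl stepB (acc, y, x) = (acc ++ walk (y, x) ds, endp (y, x) ds) := by
  induction ds generalizing acc y x with
  | nil => simp [walk, endp_nil]
  | cons d es ih =>
    simp only [List.foldl_cons, stepB, walk, ih, endp_cons, List.append_assoc, List.cons_append,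
      List.nil_append]

-- ===== VERDICT (by name: the statement is the Claim_ definition above) =====
theorem looping_spec : Claim_equal_looping := by
  intro insts _
  show looping insts = looping_alt insts
  set deltas := insts.flatMap (fun dc => List.replicate dc.2.toNat (unitDelta dc.1)) with hd
  have hA : looping insts = ((0, 0) :: walk (0, 0) deltas).dropLast := by
    rw [looping, foldA_eq insts [((0 : Int), (0 : Int))] (0, 0) (by simp),
      PySem.List.slice_to_neg_one, ← hd]
    simp
  by_cases hnil : deltas = []
  · rw [hA, hnil]
    simp [looping_alt, ← hd, hnil, walk]
  · have hwalk : walk ((0 : Int), (0 : Int)) deltas ≠ [] := by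
      intro hw
      have := length_walk ((0 : Int), (0 : Int)) deltas
      rw [hw] at this
      exact hnil (List.length_eq_zero_iff.mp this.symm)
    rw [hA, List.dropLast_cons_of_ne_nil hwalk, ← walk_dropLast]
    rw [looping_alt]
    simp only [← hd, if_neg hnil, PySem.List.slice_to_neg_one, foldB_eq]
    simp
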